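-- pv_equiv track=rewrite | github.com/OBrutus/DayUpdate-with-ML | GkToday/string_util.py | remove_escape_sequence
-- ===== SOURCE A (Python) =====
-- DEFAULT_ESCAPE_SEQUENCE_BLACKLIST = set(['\n', '\t'])
--
-- def remove_escape_sequence(
--     s: str,
--     removal: set = DEFAULT_ESCAPE_SEQUENCE_BLACKLIST,
-- ) -> str:
--     res = ''
--
--     for char in s:
--         if char in removal:
--             continue
--         res += char
--
--     return res
-- ===== SOURCE B (Python) =====
-- DEFAULT_ESCAPE_SEQUENCE_BLACKLIST = set(['\n', '\t'])
--
-- def remove_escape_sequence(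
--     s: str,
--     removal: set = DEFAULT_ESCAPE_SEQUENCE_BLACKLIST,
-- ) -> str:
--     # translation table deleting each single-character blacklist entry;
--     # longer entries can never match a single character, so they are irrelevant
--     table = {ord(c): None for c in removal if len(c) == 1}
--     return s.translate(table)
-- ===== Notes on version B (the rewrite author's own statement) =====
-- stated objective: idiomatic
-- what changed: Replaces the per-character accumulation loop with a precomputed ord-keyed deletion table applied via str.translate in one bulk pass.
import Mathlib
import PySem

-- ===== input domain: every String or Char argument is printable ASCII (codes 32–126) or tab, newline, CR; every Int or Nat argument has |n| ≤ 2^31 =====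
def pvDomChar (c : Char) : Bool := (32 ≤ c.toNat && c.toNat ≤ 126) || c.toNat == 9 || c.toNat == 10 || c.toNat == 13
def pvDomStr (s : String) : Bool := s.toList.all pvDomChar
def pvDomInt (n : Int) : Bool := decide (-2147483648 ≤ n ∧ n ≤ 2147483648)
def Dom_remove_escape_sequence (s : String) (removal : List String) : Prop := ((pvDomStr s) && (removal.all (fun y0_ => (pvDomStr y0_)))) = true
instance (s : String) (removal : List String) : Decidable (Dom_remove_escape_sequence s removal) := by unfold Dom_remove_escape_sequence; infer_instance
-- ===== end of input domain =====

-- B replaces A's per-character accumulation loop by a precomputed ord-keyed deletion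
-- table applied in one bulk pass (Python str.translate); idiomatic, same results.

-- ===== PORT A =====
-- res = ''; for char in s: if char in removal: continue; res += char
def remove_escape_sequence (s : String) (removal : List String) : String :=
  String.ofList
    (s.toList.foldl
      (fun res c => if removal.contains (String.ofList [c]) then res else res ++ [c])
      [])

-- ===== PORT B =====
-- table = {ord(c): None for c in removal if len(c) == 1}; return s.translate(table)
-- the dict's keys are the ord codes of single-character entries; translate deletes
-- exactly the characters whose code is a key mapped to None
def remove_escape_sequence_alt (s : String) (removal : List String) : String :=
  let table : List (Int × Option Unit) :=
    (removal.filter (fun t => t.toList.length == 1)).map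
      (fun t => ((Int.ofNat (t.toList.headD ' ').toNat, none)))
  String.ofList (s.toList.filter (fun c => !(table.map Prod.fst).contains (Int.ofNat c.toNat)))

-- ===== PRECONDITION & SPEC =====
def Spec_remove_escape_sequence (s : String) (removal : List String) (out : String) : Prop := out = remove_escape_sequence_alt s removal
instance (s : String) (removal : List String) (out : String) : Decidable (Spec_remove_escape_sequence s removal out) := by unfold Spec_remove_escape_sequence; infer_instance

-- ===== CLAIM (what is proved, stated in full; the proofs are below) =====
def Claim_equal_remove_escape_sequence : Prop := ∀ (s : String) (removal : List String), Dom_remove_escape_sequence s removal → Spec_remove_escape_sequence s removal (remove_escape_sequence s removal)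

-- ===== LEMMAS AND PROOFS =====

-- A's loop is acc-append filtering
theorem pv_foldA (p : Char → Bool) : ∀ (l acc : List Char),
    l.foldl (fun res c => if p c then res else res ++ [c]) acc
      = acc ++ l.filter (fun c => !p c) := by
  intro l
  induction l with
  | nil => simp
  | cons c l ih =>
    intro acc
    by_cases h : p c = true <;> simp [List.foldl, h, ih]

-- the two membership tests agree on every character
theorem pv_mem_eq (removal : List String) (c : Char) :
    removal.contains (String.ofList [c])
      = (((removal.filter (fun t => t.toList.length == 1)).map
            (fun t => Int.ofNat (t.toList.headD ' ').toNat)).contains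
          (Int.ofNat c.toNat)) := by
  rcases h : removal.contains (String.ofList [c]) with _ | _
  · symm
    rw [Bool.eq_false_iff] at h ⊢
    intro hc
    apply h
    simp only [List.contains_eq_mem, List.mem_map, List.mem_filter, decide_eq_true_eq] at hc ⊢
    obtain ⟨t, ⟨ht, hlen⟩, hcode⟩ := hc
    simp only [beq_iff_eq] at hlen
    obtain ⟨d, hd⟩ := List.length_eq_one_iff.mp hlen
    have hdc : d = c := by
      apply Char.ext
      have hn : d.toNat = c.toNat := by
        simpa [hd, Int.ofNat_inj] using hcode
      unfold Char.toNat at hn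
      exact UInt32.toNat_inj.mp hn
    have ht' : t = String.ofList [c] := by
      rw [← String.ofList_toList (s := t), hd, hdc]
    rwa [ht'] at ht
  · symm
    simp only [List.contains_eq_mem, decide_eq_true_eq, List.mem_map, List.mem_filter] at h ⊢
    exact ⟨String.ofList [c], ⟨h, by simp⟩, by simp⟩

-- ===== VERDICT (by name: the statement is the Claim_ definition above) =====
theorem remove_escape_sequence_spec : Claim_equal_remove_escape_sequence := by
  intro s removal _
  unfold Spec_remove_escape_sequence remove_escape_sequence remove_escape_sequence_alt
  simp only [pv_foldA, List.nil_append, List.map_map]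
  congr 1
  apply List.filter_congr
  intro c _
  rw [pv_mem_eq removal c]
  simp [Function.comp]
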